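-- pv_equiv track=rewrite | github.com/AmineJourney/complianceHUB | backend/library/management/commands/import_iso27001.py | _priority_from_groups
-- ===== SOURCE A (Python) =====
-- def _priority_from_groups(groups):
--     gl = [g.lower() for g in groups]
--     if "critical" in gl or "must" in gl:
--         return "critical"
--     if "high" in gl or "should" in gl:
--         return "high"
--     if "medium" in gl or "may" in gl or "soa" in gl:
--         return "medium"
--     return "low"
-- ===== SOURCE B (Python) =====
-- _RANK = {"critical": 0, "must": 0, "high": 1, "should": 1,
--          "medium": 2, "may": 2, "soa": 2}
-- _LABELS = ["critical", "high", "medium", "low"]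
--
-- def _priority_from_groups(groups):
--     best = 3
--     for g in groups:
--         r = _RANK.get(g.lower(), 3)
--         if r < best:
--             best = r
--     return _LABELS[best]
-- ===== Notes on version B (the rewrite author's own statement) =====
-- stated objective: alternative
-- what changed: Replaces the tier-by-tier membership scans over a lowered copy of the list with a single running-min fold: each group is lowered once and looked up in a keyword->rank dict, and the best (minimum) rank seen is mapped back to its label.
import Mathlib
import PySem

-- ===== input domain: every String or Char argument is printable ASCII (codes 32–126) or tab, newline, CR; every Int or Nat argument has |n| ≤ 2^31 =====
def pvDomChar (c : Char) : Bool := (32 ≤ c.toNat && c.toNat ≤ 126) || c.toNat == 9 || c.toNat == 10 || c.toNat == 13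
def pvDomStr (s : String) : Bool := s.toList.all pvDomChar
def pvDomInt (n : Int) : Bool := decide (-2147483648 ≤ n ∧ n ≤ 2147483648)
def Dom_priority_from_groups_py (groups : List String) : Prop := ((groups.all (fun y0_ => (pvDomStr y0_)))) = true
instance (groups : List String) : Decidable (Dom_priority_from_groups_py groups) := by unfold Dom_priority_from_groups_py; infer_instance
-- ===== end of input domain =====

-- One-line: B replaces A's tier-by-tier membership scans with a single running-min
-- fold over a keyword->rank dict, mapping the minimum rank back to its label (alternative decomposition).


-- ===== PORT A =====
def priority_from_groups_py (groups : List String) : String :=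
  let gl := groups.map (fun g => PySem.Str.lower g)
  if "critical" ∈ gl ∨ "must" ∈ gl then "critical"
  else if "high" ∈ gl ∨ "should" ∈ gl then "high"
  else if "medium" ∈ gl ∨ "may" ∈ gl ∨ "soa" ∈ gl then "medium"
  else "low"

-- ===== PORT B =====
def pfRank : PySem.Dict String Nat :=
  PySem.Dict.ofList [("critical", 0), ("must", 0), ("high", 1), ("should", 1),
                     ("medium", 2), ("may", 2), ("soa", 2)]

def pfLabels : List String := ["critical", "high", "medium", "low"]

def priority_from_groups_py_alt (groups : List String) : String :=
  let best := groups.foldl (fun b g =>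
    let r := PySem.Dict.getD pfRank (PySem.Str.lower g) 3
    if r < b then r else b) 3
  pfLabels.getD best "low"

-- ===== PRECONDITION & SPEC =====
def Spec_priority_from_groups_py (groups : List String) (out : String) : Prop := out = priority_from_groups_py_alt groups
instance (groups : List String) (out : String) : Decidable (Spec_priority_from_groups_py groups out) := by unfold Spec_priority_from_groups_py; infer_instance

-- ===== CLAIM (what is proved, stated in full; the proofs are below) =====
def Claim_equal_priority_from_groups_py : Prop := ∀ (groups : List String), Dom_priority_from_groups_py groups → Spec_priority_from_groups_py groups (priority_from_groups_py groups)

-- ===== LEMMAS AND PROOFS =====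

-- rank of a single (already lowered) string, as B's dict lookup computes it
def pvRank (s : String) : Nat := PySem.Dict.getD pfRank s 3

lemma pfRank_mk : pfRank = PySem.Dict.mk [("critical", 0), ("must", 0), ("high", 1),
    ("should", 1), ("medium", 2), ("may", 2), ("soa", 2)] := by decide

lemma pvRank_eq (s : String) :
    pvRank s = if s = "critical" ∨ s = "must" then 0
               else if s = "high" ∨ s = "should" then 1
               else if s = "medium" ∨ s = "may" ∨ s = "soa" then 2
               else 3 := by
  simp only [pvRank, pfRank_mk, PySem.Dict.getD_eq_get?_getD, PySem.Dict.get?_mk_cons,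
    beq_iff_eq]
  split_ifs <;> simp_all [eq_comm, PySem.Dict.get?]

-- minimum rank of a list of (lowered) strings
def pvMin : List String → Nat
  | [] => 3
  | s :: t => min (pvRank s) (pvMin t)

lemma pvMin_le (l : List String) : pvMin l ≤ 3 := by
  induction l with
  | nil => simp [pvMin]
  | cons s t ih => simp only [pvMin]; omega

lemma if_lt_eq_min (r b : Nat) : (if r < b then r else b) = min b r := by
  split_ifs with h <;> omega

lemma foldl_eq_pvMin (l : List String) (b : Nat) (hb : b ≤ 3) :
    l.foldl (fun b g =>
      let r := PySem.Dict.getD pfRank (PySem.Str.lower g) 3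
      if r < b then r else b) b
      = min b (pvMin (l.map (fun g => PySem.Str.lower g))) := by
  induction l generalizing b with
  | nil => simp only [List.foldl_nil, List.map_nil, pvMin]; omega
  | cons s t ih =>
      simp only [List.foldl_cons, List.map_cons, pvMin]
      rw [if_lt_eq_min,
        ih (min b (PySem.Dict.getD pfRank (PySem.Str.lower s) 3)) (by omega)]
      rw [show PySem.Dict.getD pfRank (PySem.Str.lower s) 3 = pvRank (PySem.Str.lower s) from rfl]
      omega

lemma pvMin_le_of_mem {l : List String} {s : String} (h : s ∈ l) : pvMin l ≤ pvRank s := by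
  induction l with
  | nil => cases h
  | cons a t ih =>
      rcases List.mem_cons.1 h with h | h
      · subst h; simp only [pvMin]; omega
      · have := ih h; simp only [pvMin]; omega

lemma pvMin_le_iff {l : List String} {k : Nat} (hk : k < 3) :
    pvMin l ≤ k ↔ ∃ s ∈ l, pvRank s ≤ k := by
  induction l with
  | nil => simp [pvMin]; omega
  | cons a t ih =>
      simp only [pvMin, min_le_iff, ih, List.mem_cons]
      constructor
      · rintro (h | ⟨s, hs, hle⟩)
        · exact ⟨a, Or.inl rfl, h⟩
        · exact ⟨s, Or.inr hs, hle⟩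
      · rintro ⟨s, (rfl | hs), hle⟩
        · exact Or.inl hle
        · exact Or.inr ⟨s, hs, hle⟩

-- ===== VERDICT (by name: the statement is the Claim_ definition above) =====
theorem priority_from_groups_py_spec : Claim_equal_priority_from_groups_py := by
  intro groups _
  show _ = _
  unfold priority_from_groups_py priority_from_groups_py_alt
  rw [foldl_eq_pvMin _ _ (by omega)]
  dsimp only
  set L := groups.map (fun g => PySem.Str.lower g) with hL
  have hle3 := pvMin_le L
  split_ifs with h1 h2 h3
  · -- critical tier: pvMin L = 0
    have h0 : pvMin L ≤ 0 := by
      rcases h1 with h | h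
      · have := pvMin_le_of_mem h
        rw [show pvRank "critical" = 0 from by decide] at this; omega
      · have := pvMin_le_of_mem h
        rw [show pvRank "must" = 0 from by decide] at this; omega
    have : min 3 (pvMin L) = 0 := by omega
    rw [this]; rfl
  · -- high tier: pvMin L = 1
    have hub : pvMin L ≤ 1 := by
      rcases h2 with h | h
      · have := pvMin_le_of_mem h
        rw [show pvRank "high" = 1 from by decide] at this; omega
      · have := pvMin_le_of_mem h
        rw [show pvRank "should" = 1 from by decide] at this; omega
    have hlb : ¬ pvMin L ≤ 0 := by
      rw [pvMin_le_iff (by omega)]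
      rintro ⟨s, hs, hle⟩
      rw [pvRank_eq] at hle
      split_ifs at hle with hc hh hm <;> try omega
      rcases hc with rfl | rfl <;> exact h1 (by tauto)
    have : min 3 (pvMin L) = 1 := by omega
    rw [this]; rfl
  · -- medium tier: pvMin L = 2
    have hub : pvMin L ≤ 2 := by
      rcases h3 with h | h | h <;>
        · have := pvMin_le_of_mem h
          first
            | rw [show pvRank "medium" = 2 from by decide] at this
            | rw [show pvRank "may" = 2 from by decide] at this
            | rw [show pvRank "soa" = 2 from by decide] at this
          omega
    have hlb : ¬ pvMin L ≤ 1 := by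
      rw [pvMin_le_iff (by omega)]
      rintro ⟨s, hs, hle⟩
      rw [pvRank_eq] at hle
      split_ifs at hle with hc hh hm <;> try omega
      · rcases hc with rfl | rfl <;> exact h1 (by tauto)
      · rcases hh with rfl | rfl <;> exact h2 (by tauto)
    have : min 3 (pvMin L) = 2 := by omega
    rw [this]; rfl
  · -- no keyword present: pvMin L = 3
    have hlb : ¬ pvMin L ≤ 2 := by
      rw [pvMin_le_iff (by omega)]
      rintro ⟨s, hs, hle⟩
      rw [pvRank_eq] at hle
      split_ifs at hle with hc hh hm <;> try omega
      · rcases hc with rfl | rfl <;> exact h1 (by tauto)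
      · rcases hh with rfl | rfl <;> exact h2 (by tauto)
      · rcases hm with rfl | rfl | rfl <;> exact h3 (by tauto)
    have : min 3 (pvMin L) = 3 := by omega
    rw [this]; rfl
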